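-- pv_equiv track=rewrite | github.com/lyccyl1/VLM-planning | virtual_simpleenv_pipeline.py | _keyword_pick
-- ===== SOURCE A (Python) =====
-- from typing import Any, Dict, Iterable, List, Mapping, Sequence, Tuple
--
-- def _keyword_pick(labels: Sequence[str], keywords: Sequence[str], exclude: Iterable[str] | None = None) -> str | None:
--     exclude_set = set(exclude or [])
--     for kw in keywords:
--         for lb in labels:
--             if lb in exclude_set:
--                 continue
--             if kw in lb.lower():
--                 return lb
--     return None
-- ===== SOURCE B (Python) =====
-- def _keyword_pick(labels, keywords, exclude=None):
--     # Single pass over labels: keep the label with the smallest matching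
--     # keyword index (strict < so the earliest label wins within a keyword).
--     exclude_set = set(exclude or [])
--     best_label = None
--     best_idx = len(keywords)
--     for lb in labels:
--         if lb in exclude_set:
--             continue
--         low = lb.lower()
--         i = next((j for j, kw in enumerate(keywords) if kw in low), None)
--         if i is not None and i < best_idx:
--             best_idx = i
--             best_label = lb
--     return best_label
-- ===== Notes on version B (the rewrite author's own statement) =====
-- stated objective: alternative
-- what changed: B swaps the loop nesting: one pass over labels, computing each label's first-matching keyword index and keeping the (keyword-index, label-order)-minimal label, instead of A's restart-from-scratch scan of all labels for every keyword.
import Mathlib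
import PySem

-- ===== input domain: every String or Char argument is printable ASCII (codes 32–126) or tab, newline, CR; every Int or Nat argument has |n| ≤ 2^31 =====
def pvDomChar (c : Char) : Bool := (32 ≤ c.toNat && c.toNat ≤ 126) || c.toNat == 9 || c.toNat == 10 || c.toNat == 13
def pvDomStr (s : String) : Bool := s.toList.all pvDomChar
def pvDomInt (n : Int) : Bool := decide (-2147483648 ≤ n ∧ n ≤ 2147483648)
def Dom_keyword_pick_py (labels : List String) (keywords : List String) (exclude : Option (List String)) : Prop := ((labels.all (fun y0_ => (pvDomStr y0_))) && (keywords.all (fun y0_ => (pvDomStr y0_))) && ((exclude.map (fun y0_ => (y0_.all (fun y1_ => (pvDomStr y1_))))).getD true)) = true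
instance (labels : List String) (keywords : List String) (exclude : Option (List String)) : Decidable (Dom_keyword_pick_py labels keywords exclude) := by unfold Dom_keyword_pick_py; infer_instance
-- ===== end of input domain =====

-- B swaps the loop nesting: one pass over labels keeping the (keyword-index, label-order)-minimal
-- match, instead of A's rescan of all labels per keyword; same cost, different decomposition.


-- ===== PORT A =====
-- inner 'for lb in labels: … return lb' of A
def pvAInner (excl : List String) (kw : String) : List String → Option String
  | [] => none
  | lb :: rest =>
      if PySem.Set.contains excl lb then pvAInner excl kw rest
      else if PySem.Str.isIn kw (PySem.Str.lower lb) then some lb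
      else pvAInner excl kw rest

-- outer 'for kw in keywords' of A
def pvAOuter (excl : List String) (labels : List String) : List String → Option String
  | [] => none
  | kw :: rest =>
      match pvAInner excl kw labels with
      | some lb => some lb
      | none => pvAOuter excl labels rest

def keyword_pick_py (labels : List String) (keywords : List String) (exclude : Option (List String)) : Option String :=
  pvAOuter (PySem.Set.ofList (exclude.getD [])) labels keywords

-- ===== PORT B =====
-- 'next((j for j, kw in enumerate(keywords) if kw in low), None)' of B
def pvFirstKw : List String → String → Option Nat
  | [], _ => none
  | kw :: rest, low =>
      if PySem.Str.isIn kw low then some 0 else (pvFirstKw rest low).map (· + 1)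

-- B's single pass over labels with accumulator (best_idx, best_label)
def pvBLoop (excl : List String) (keywords : List String) : List String → Nat → Option String → Option String
  | [], _, best => best
  | lb :: rest, bestIdx, best =>
      if PySem.Set.contains excl lb then pvBLoop excl keywords rest bestIdx best
      else
        match pvFirstKw keywords (PySem.Str.lower lb) with
        | some i =>
            if i < bestIdx then pvBLoop excl keywords rest i (some lb)
            else pvBLoop excl keywords rest bestIdx best
        | none => pvBLoop excl keywords rest bestIdx best

def keyword_pick_py_alt (labels : List String) (keywords : List String) (exclude : Option (List String)) : Option String :=
  pvBLoop (PySem.Set.ofList (exclude.getD [])) keywords labels keywords.length none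

-- ===== PRECONDITION & SPEC =====
def Spec_keyword_pick_py (labels : List String) (keywords : List String) (exclude : Option (List String)) (out : Option String) : Prop := out = keyword_pick_py_alt labels keywords exclude
instance (labels : List String) (keywords : List String) (exclude : Option (List String)) (out : Option String) : Decidable (Spec_keyword_pick_py labels keywords exclude out) := by unfold Spec_keyword_pick_py; infer_instance

-- ===== CLAIM (what is proved, stated in full; the proofs are below) =====
def Claim_equal_keyword_pick_py : Prop := ∀ (labels : List String) (keywords : List String) (exclude : Option (List String)), Dom_keyword_pick_py labels keywords exclude → Spec_keyword_pick_py labels keywords exclude (keyword_pick_py labels keywords exclude)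

-- ===== LEMMAS AND PROOFS =====

-- rank of a label: index of the first keyword contained in its lowercase form (none = excluded/no match)
def pvRk (excl ks : List String) (lb : String) : Option Nat :=
  if PySem.Set.contains excl lb then none else pvFirstKw ks (PySem.Str.lower lb)

-- minimum of a list of Nats
def pvMin : List Nat → Option Nat
  | [] => none
  | a :: l => some (match pvMin l with | none => a | some m => min a m)

-- threshold: keep only values < b
def pvThr (b : Nat) (o : Option Nat) : Option Nat :=
  o.bind (fun j => if j < b then some j else none)

-- the common declarative form: first label whose rank is the minimal rank
def pvSpecF (f : String → Option Nat) (ls : List String) : Option String :=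
  match pvMin (ls.filterMap f) with
  | none => none
  | some m => ls.find? (fun lb => f lb == some m)

theorem pvMin_eq_none (l : List Nat) : pvMin l = none ↔ l = [] := by
  cases l <;> simp [pvMin]

theorem pvMin_mem {l : List Nat} {m : Nat} (h : pvMin l = some m) : m ∈ l := by
  induction l generalizing m with
  | nil => simp [pvMin] at h
  | cons a t ih =>
    simp only [pvMin, Option.some.injEq] at h
    cases ht : pvMin t with
    | none => rw [ht] at h; simp at h; simp [← h]
    | some m' =>
      rw [ht] at h; simp at h
      rcases Nat.le_total a m' with hle | hle
      · have hma : m = a := by omega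
        simp [hma]
      · have hmm : m = m' := by omega
        exact hmm ▸ List.mem_cons_of_mem _ (ih ht)

theorem pvMin_le {l : List Nat} {m : Nat} (h : pvMin l = some m) : ∀ x ∈ l, m ≤ x := by
  induction l generalizing m with
  | nil => simp [pvMin] at h
  | cons a t ih =>
    intro x hx
    simp only [pvMin, Option.some.injEq] at h
    rcases List.mem_cons.1 hx with rfl | hx'
    · cases ht : pvMin t <;> rw [ht] at h <;> simp at h <;> omega
    · cases ht : pvMin t with
      | none => rw [(pvMin_eq_none t).1 ht] at hx'; simp at hx'
      | some m' =>
        rw [ht] at h; simp at h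
        have := ih ht x hx'
        omega

theorem pvFind?_congr {p q : String → Bool} {ls : List String}
    (h : ∀ x ∈ ls, p x = q x) : ls.find? p = ls.find? q := by
  induction ls with
  | nil => rfl
  | cons a t ih =>
    simp only [List.find?, h a (by simp)]
    cases q a
    · exact ih (fun x hx => h x (by simp [hx]))
    · rfl

theorem pvSpecF_cons_none {f : String → Option Nat} {lb : String} (rest : List String)
    (h : f lb = none) : pvSpecF f (lb :: rest) = pvSpecF f rest := by
  simp [pvSpecF, h, List.find?]

theorem pvFirstKw_lt {ks : List String} {low : String} {i : Nat}
    (h : pvFirstKw ks low = some i) : i < ks.length := by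
  induction ks generalizing i with
  | nil => simp [pvFirstKw] at h
  | cons kw t ih =>
    simp only [pvFirstKw] at h
    split at h
    · simp at h; simp only [List.length_cons]; omega
    · simp only [Option.map_eq_some_iff] at h
      obtain ⟨j, hj, hji⟩ := h
      have := ih hj
      simp only [List.length_cons]; omega

theorem pvRk_cons (excl : List String) (kw : String) (ks : List String) (lb : String) :
    pvRk excl (kw :: ks) lb =
      if (!PySem.Set.contains excl lb && PySem.Str.isIn kw (PySem.Str.lower lb)) then some 0
      else (pvRk excl ks lb).map (· + 1) := by
  unfold pvRk
  by_cases hm : lb ∈ excl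
  · simp [hm]
  · by_cases hi : PySem.Chars.isIn kw.toList (PySem.Chars.lower lb.toList) <;>
      simp [hm, hi, pvFirstKw]

theorem pvAInner_eq_find? (excl : List String) (kw : String) (ls : List String) :
    pvAInner excl kw ls =
      ls.find? (fun lb => !PySem.Set.contains excl lb && PySem.Str.isIn kw (PySem.Str.lower lb)) := by
  induction ls with
  | nil => rfl
  | cons lb rest ih =>
    simp only [pvAInner, List.find?]
    by_cases hm : lb ∈ excl
    · simp [hm, ih]
    · by_cases hi : PySem.Chars.isIn kw.toList (PySem.Chars.lower lb.toList) <;>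
        simp [hm, hi, ih]

theorem pvSpecF_congr {f g : String → Option Nat} {ls : List String}
    (h : ∀ lb ∈ ls, f lb = g lb) : pvSpecF f ls = pvSpecF g ls := by
  unfold pvSpecF
  rw [List.filterMap_congr h]
  cases pvMin (ls.filterMap g) with
  | none => rfl
  | some m => exact pvFind?_congr (fun x hx => by rw [h x hx])

theorem pvMin_map_succ (l : List Nat) : pvMin (l.map (· + 1)) = (pvMin l).map (· + 1) := by
  induction l with
  | nil => rfl
  | cons a t ih =>
    simp only [List.map_cons, pvMin, ih]
    cases pvMin t
    · rfl
    · simp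

theorem pvSpecF_map_succ (f : String → Option Nat) (ls : List String) :
    pvSpecF (fun lb => (f lb).map (· + 1)) ls = pvSpecF f ls := by
  unfold pvSpecF
  have h1 : ls.filterMap (fun lb => (f lb).map (· + 1)) = (ls.filterMap f).map (· + 1) := by
    rw [List.map_filterMap]
  rw [h1, pvMin_map_succ]
  cases pvMin (ls.filterMap f) with
  | none => rfl
  | some m =>
    simp only [Option.map_some]
    exact pvFind?_congr (fun lb _ => by cases f lb <;> simp)

theorem pvA_eq_spec (excl ls : List String) (ks : List String) :
    pvAOuter excl ls ks = pvSpecF (pvRk excl ks) ls := by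
  induction ks with
  | nil =>
    have hnil : ls.filterMap (pvRk excl []) = [] := by
      rw [List.filterMap_eq_nil_iff]
      intro lb _; unfold pvRk pvFirstKw; split <;> rfl
    simp [pvAOuter, pvSpecF, hnil, pvMin]
  | cons kw rest ih =>
    have hpred : ∀ lb, (pvRk excl (kw :: rest) lb == some 0) =
        (!PySem.Set.contains excl lb && PySem.Str.isIn kw (PySem.Str.lower lb)) := by
      intro lb
      rw [pvRk_cons]
      by_cases hm : lb ∈ excl
      · simp only [show (!PySem.Set.contains excl lb && PySem.Str.isIn kw (PySem.Str.lower lb)) = false from by simp [hm]]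
        cases pvRk excl rest lb <;> simp
      · by_cases hi : PySem.Chars.isIn kw.toList (PySem.Chars.lower lb.toList)
        · simp only [show (!PySem.Set.contains excl lb && PySem.Str.isIn kw (PySem.Str.lower lb)) = true from by simp [hm, hi]]
          simp
        · simp only [show (!PySem.Set.contains excl lb && PySem.Str.isIn kw (PySem.Str.lower lb)) = false from by simp [hm, hi]]
          cases pvRk excl rest lb <;> simp
    simp only [pvAOuter, pvAInner_eq_find?]
    cases hfind : ls.find? (fun lb => !PySem.Set.contains excl lb && PySem.Str.isIn kw (PySem.Str.lower lb)) with
    | none =>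
      rw [ih]
      have hz : ∀ lb ∈ ls, pvRk excl (kw :: rest) lb = (pvRk excl rest lb).map (· + 1) := by
        intro lb hlb
        have hnp := List.find?_eq_none.1 hfind lb hlb
        rw [pvRk_cons, if_neg (by simpa using hnp)]
      exact ((pvSpecF_congr hz).trans (pvSpecF_map_succ _ ls)).symm
    | some lb =>
      have hfind' : ls.find? (fun x => pvRk excl (kw :: rest) x == some 0) = some lb := by
        rw [show (fun x => pvRk excl (kw :: rest) x == some 0) =
              (fun x => !PySem.Set.contains excl x && PySem.Str.isIn kw (PySem.Str.lower x)) from funext hpred]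
        exact hfind
      have hmem : lb ∈ ls := List.mem_of_find?_eq_some hfind'
      have hlb0 : pvRk excl (kw :: rest) lb = some 0 := by
        have := List.find?_some hfind'
        simpa using this
      have h0mem : (0 : Nat) ∈ ls.filterMap (pvRk excl (kw :: rest)) :=
        List.mem_filterMap.2 ⟨lb, hmem, hlb0⟩
      obtain ⟨m, hm⟩ : ∃ m, pvMin (ls.filterMap (pvRk excl (kw :: rest))) = some m := by
        cases h : pvMin (ls.filterMap (pvRk excl (kw :: rest))) with
        | none => rw [pvMin_eq_none] at h; simp [h] at h0mem
        | some m => exact ⟨m, rfl⟩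
      have hm0 : m = 0 := Nat.le_zero.1 (pvMin_le hm 0 h0mem)
      subst hm0
      unfold pvSpecF
      rw [hm]
      simpa using hfind'.symm

theorem pvThr_filterMap (g : String → Option Nat) (c : Nat) (xs : List String) :
    xs.filterMap (fun x => pvThr c (g x)) = (xs.filterMap g).filter (· < c) := by
  induction xs with
  | nil => rfl
  | cons x t ih =>
    rw [List.filterMap_cons, ih]
    cases hg : g x with
    | none => simp [pvThr, hg]
    | some j =>
      by_cases hj : j < c <;>
        simp [pvThr, hg, hj]

theorem pvThr_some {c j : Nat} (h : j < c) : pvThr c (some j) = some j := by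
  simp [pvThr, h]

theorem pvThr_eq_some_imp {c : Nat} {o : Option Nat} {j : Nat}
    (h : pvThr c o = some j) : o = some j ∧ j < c := by
  cases o with
  | none => simp [pvThr] at h
  | some k =>
    by_cases hk : k < c
    · simp [pvThr, hk] at h
      exact ⟨by rw [h], h ▸ hk⟩
    · simp [pvThr, hk] at h

theorem pvB_loop_spec (excl ks : List String) :
    ∀ (ls : List String) (b : Nat) (best : Option String),
      pvBLoop excl ks ls b best =
        match pvSpecF (fun lb => pvThr b (pvRk excl ks lb)) ls with
        | some lb => some lb
        | none => best := by
  intro ls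
  induction ls with
  | nil => intro b best; simp [pvBLoop, pvSpecF, pvMin]
  | cons lb rest ih =>
    intro b best
    by_cases hm : lb ∈ excl
    · have hr : pvRk excl ks lb = none := by unfold pvRk; simp [hm]
      rw [pvSpecF_cons_none rest (by simp [hr, pvThr]),
          show pvBLoop excl ks (lb :: rest) b best = pvBLoop excl ks rest b best from by
            simp [pvBLoop, hm]]
      exact ih b best
    · cases hf : pvFirstKw ks (PySem.Str.lower lb) with
      | none =>
        have hr : pvRk excl ks lb = none := by unfold pvRk; simp [hm, hf]
        rw [pvSpecF_cons_none rest (by simp [hr, pvThr]),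
            show pvBLoop excl ks (lb :: rest) b best = pvBLoop excl ks rest b best from by
              simp [pvBLoop, hm, hf]]
        exact ih b best
      | some i =>
        have hr : pvRk excl ks lb = some i := by unfold pvRk; simp [hm, hf]
        by_cases hib : i < b
        · -- head updates the accumulator
          rw [show pvBLoop excl ks (lb :: rest) b best = pvBLoop excl ks rest i (some lb) from by
                simp [pvBLoop, hm, hf, hib],
              ih i (some lb)]
          have hhead : pvThr b (pvRk excl ks lb) = some i := by simp [hr, pvThr, hib]
          have hcons : List.filterMap (fun x => pvThr b (pvRk excl ks x)) (lb :: rest) =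
              i :: rest.filterMap (fun x => pvThr b (pvRk excl ks x)) := by
            rw [List.filterMap_cons]; simp [hhead]
          have hLi : rest.filterMap (fun x => pvThr i (pvRk excl ks x)) =
              (rest.filterMap (fun x => pvThr b (pvRk excl ks x))).filter (fun x => x < i) := by
            rw [pvThr_filterMap, pvThr_filterMap, List.filter_filter]
            congr 1
            funext x
            by_cases h1 : x < i
            · have h2 : x < b := by omega
              simp [h1, h2]
            · simp [h1]
          cases hM : pvMin (rest.filterMap (fun x => pvThr b (pvRk excl ks x))) with
          | none =>
            have hLnil : rest.filterMap (fun x => pvThr b (pvRk excl ks x)) = [] :=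
              (pvMin_eq_none _).1 hM
            have hnone : pvSpecF (fun x => pvThr i (pvRk excl ks x)) rest = none := by
              unfold pvSpecF; rw [hLi, hLnil]; rfl
            rw [hnone]
            unfold pvSpecF
            rw [hcons, hLnil]
            simp [pvMin, List.find?, hhead]
          | some m =>
            by_cases him : i ≤ m
            · -- the head is the new minimum; nothing below i in the rest
              have hfiltnil : (rest.filterMap (fun x => pvThr b (pvRk excl ks x))).filter (fun x => x < i) = [] := by
                rw [List.filter_eq_nil_iff]
                intro x hx
                have := pvMin_le hM x hx
                simp; omega
              have hnone : pvSpecF (fun x => pvThr i (pvRk excl ks x)) rest = none := by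
                unfold pvSpecF; rw [hLi, hfiltnil]; rfl
              rw [hnone]
              unfold pvSpecF
              rw [hcons]
              rw [show pvMin (i :: rest.filterMap (fun x => pvThr b (pvRk excl ks x))) = some i from by
                    simp [pvMin, hM]; omega]
              simp [List.find?, hhead]
            · -- the minimum m of the rest beats the head (m < i)
              have hmi : m < i := by omega
              have hmmem := pvMin_mem hM
              have hmin' : pvMin (rest.filterMap (fun x => pvThr i (pvRk excl ks x))) = some m := by
                rw [hLi]
                have hmem' : m ∈ (rest.filterMap (fun x => pvThr b (pvRk excl ks x))).filter (fun x => x < i) :=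
                  List.mem_filter.2 ⟨hmmem, by simp [hmi]⟩
                obtain ⟨m', hm'⟩ : ∃ m', pvMin ((rest.filterMap (fun x => pvThr b (pvRk excl ks x))).filter (fun x => x < i)) = some m' := by
                  cases h : pvMin ((rest.filterMap (fun x => pvThr b (pvRk excl ks x))).filter (fun x => x < i)) with
                  | none => rw [pvMin_eq_none] at h; simp [h] at hmem'
                  | some m' => exact ⟨m', rfl⟩
                have h1 : m' ≤ m := pvMin_le hm' m hmem'
                have h2 : m ≤ m' := pvMin_le hM m' (List.mem_of_mem_filter (pvMin_mem hm'))
                rw [hm']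
                congr 1
                omega
              have hpred : (fun x => pvThr i (pvRk excl ks x) == some m) =
                  (fun x => pvThr b (pvRk excl ks x) == some m) := by
                funext x
                by_cases h1 : pvRk excl ks x = some m
                · have e1 : pvThr i (pvRk excl ks x) = some m := by rw [h1]; exact pvThr_some hmi
                  have e2 : pvThr b (pvRk excl ks x) = some m := by
                    rw [h1]; exact pvThr_some (by omega)
                  rw [e1, e2]
                · have e1 : pvThr i (pvRk excl ks x) ≠ some m :=
                    fun hc' => h1 (pvThr_eq_some_imp hc').1
                  have e2 : pvThr b (pvRk excl ks x) ≠ some m :=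
                    fun hc' => h1 (pvThr_eq_some_imp hc').1
                  simp [e1, e2]
              have hsome : (rest.find? (fun x => pvThr i (pvRk excl ks x) == some m)).isSome := by
                rw [List.find?_isSome]
                obtain ⟨x, hx, hxv⟩ := List.mem_filterMap.1 (pvMin_mem hmin')
                exact ⟨x, hx, by simp [hxv]⟩
              obtain ⟨y, hy⟩ := Option.isSome_iff_exists.1 hsome
              rw [show pvSpecF (fun x => pvThr i (pvRk excl ks x)) rest = some y from by
                    unfold pvSpecF; rw [hmin']; simpa using hy]
              unfold pvSpecF
              rw [hcons]
              rw [show pvMin (i :: rest.filterMap (fun x => pvThr b (pvRk excl ks x))) = some m from by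
                    simp [pvMin, hM]; omega]
              have hheadpred : (pvThr b (pvRk excl ks lb) == some m) = false := by
                simp [hhead]; omega
              simp only [List.find?, hheadpred]
              rw [← hpred, hy]
        · -- no improvement: the thresholded rank of the head is none
          rw [show pvBLoop excl ks (lb :: rest) b best = pvBLoop excl ks rest b best from by
                simp [pvBLoop, hm, hf, hib],
              ih b best, pvSpecF_cons_none rest (by simp [hr, pvThr, hib])]

theorem pvB_eq_spec (excl ls ks : List String) :
    pvBLoop excl ks ls ks.length none = pvSpecF (pvRk excl ks) ls := by
  rw [pvB_loop_spec excl ks ls ks.length none]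
  rw [show (fun lb => pvThr ks.length (pvRk excl ks lb)) = pvRk excl ks from by
        funext lb
        unfold pvRk
        split
        · rfl
        · cases hf : pvFirstKw ks (PySem.Str.lower lb) with
          | none => rfl
          | some i => simp [pvThr, pvFirstKw_lt hf]]
  cases pvSpecF (pvRk excl ks) ls <;> rfl

-- ===== VERDICT (by name: the statement is the Claim_ definition above) =====
theorem keyword_pick_py_spec : Claim_equal_keyword_pick_py := by
  intro labels keywords exclude _
  unfold Spec_keyword_pick_py keyword_pick_py keyword_pick_py_alt
  rw [pvA_eq_spec, pvB_eq_spec]
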